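-- pv_equiv track=rewrite | github.com/dioptre/compacto | compactifai/paper_exact_mpo.py | _paper_factorization
-- ===== SOURCE A (Python) =====
-- from typing import Tuple, List, Dict, Any, Optional
-- import math
--
-- def _paper_factorization(dim: int) -> Tuple[int, int]:
--     """
--     Factorize dimension following paper's approach.
--
--     Paper example: 216 = 6 × 36
--     This suggests finding factors where one is ~sqrt(dim)/6 and other is larger.
--     """
--     if dim <= 36:
--         return (1, dim)
--
--     # Try to mimic paper's 216 = 6×36 pattern
--     sqrt_dim = int(math.sqrt(dim))
--
--     # Find factors close to paper's ratio
--     for small_factor in range(max(1, sqrt_dim // 6), sqrt_dim + 1):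
--         if dim % small_factor == 0:
--             large_factor = dim // small_factor
--             # Prefer ratios similar to 6:36 = 1:6
--             if large_factor >= small_factor * 3:
--                 return (small_factor, large_factor)
--
--     # Fallback: find any good factorization
--     for small_factor in range(2, sqrt_dim + 1):
--         if dim % small_factor == 0:
--             return (small_factor, dim // small_factor)
--
--     # Last resort
--     return (1, dim)
-- ===== SOURCE B (Python) =====
-- import math
-- from typing import Tuple
--
--
-- def _paper_factorization(dim: int) -> Tuple[int, int]:
--     """Single fused divisor scan with accumulators, after an algebraic rewrite.
--
--     For 36 < dim <= 143 we have isqrt(dim)//6 <= 1, so A's preferred-ratio scan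
--     starts at small=1, which always qualifies (dim >= 3): the answer is (1, dim),
--     folded into the closed-form small case.  For dim >= 144 the ratio test
--     large >= 3*small is rewritten as small <= isqrt(dim//3), so one pass over
--     s in [2, isqrt(dim)] with two 'first hit' accumulators replaces A's two
--     staged early-return scans.
--     """
--     if dim <= 143:
--         return (1, dim)
--     r = math.isqrt(dim)
--     lo = r // 6                 # >= 2 since r >= 12
--     hi = math.isqrt(dim // 3)   # s qualifies for the preferred ratio iff s <= hi
--     preferred = fallback = None
--     for s in range(2, r + 1):
--         if dim % s:
--             continue
--         if fallback is None:
--             fallback = s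
--         if preferred is None and lo <= s <= hi:
--             preferred = s
--     if preferred is not None:
--         return (preferred, dim // preferred)
--     if fallback is not None:
--         return (fallback, dim // fallback)
--     return (1, dim)
-- ===== Notes on version B (the rewrite author's own statement) =====
-- stated objective: alternative
-- what changed: B replaces A's two staged early-return range scans by a closed-form answer for dim<=143 (where A's preferred scan starts at small=1 and returns (1,dim) immediately) plus, for dim>=144, one fused divisor pass with two first-hit accumulators after rewriting the ratio test large>=3*small as small<=isqrt(dim//3).
import Mathlib
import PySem

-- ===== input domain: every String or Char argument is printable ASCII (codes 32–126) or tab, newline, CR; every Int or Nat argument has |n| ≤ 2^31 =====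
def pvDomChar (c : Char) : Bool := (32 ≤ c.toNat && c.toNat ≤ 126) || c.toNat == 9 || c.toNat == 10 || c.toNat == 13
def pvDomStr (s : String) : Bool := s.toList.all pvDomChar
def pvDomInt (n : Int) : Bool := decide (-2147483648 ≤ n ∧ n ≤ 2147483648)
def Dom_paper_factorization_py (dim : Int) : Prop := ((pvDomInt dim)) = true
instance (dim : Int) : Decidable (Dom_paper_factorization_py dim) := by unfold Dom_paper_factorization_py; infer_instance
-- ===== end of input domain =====

-- B folds A's small case (36 < dim <= 143, where A's preferred scan starts at 1 and returns
-- (1, dim) at once) into a closed-form branch and, for dim >= 144, replaces A's two staged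
-- early-return scans by one fused divisor pass with two first-hit accumulators, the ratio
-- test rewritten as an interval bound (objective: alternative, same O(sqrt dim) cost).

-- ===== PORT A =====
-- A's int(math.sqrt(dim)) and B's math.isqrt(dim) both equal the integer square root for
-- the nonnegative arguments reached here (dim ≤ 2^31 is far below where doubles lose it):
-- ported as Nat.sqrt.
def pvISqrt (dim : Int) : Int := Int.ofNat (Nat.sqrt dim.toNat)

-- first for-loop of A: scan, skip non-divisors and bad ratios, return on first hit
def pvALoop1 (dim : Int) : List Int → Option (Int × Int)
  | [] => none
  | s :: rest =>
    if PySem.Int.mod dim s = 0 then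
      let large := PySem.Int.floordiv dim s
      if large ≥ s * 3 then some (s, large) else pvALoop1 dim rest
    else pvALoop1 dim rest

-- second for-loop of A: return on the first divisor
def pvALoop2 (dim : Int) : List Int → Option (Int × Int)
  | [] => none
  | s :: rest =>
    if PySem.Int.mod dim s = 0 then some (s, PySem.Int.floordiv dim s)
    else pvALoop2 dim rest

def paper_factorization_py (dim : Int) : Int × Int :=
  if dim ≤ 36 then (1, dim)
  else
    let sqrt_dim := pvISqrt dim
    match pvALoop1 dim (PySem.List.pyRange (max 1 (PySem.Int.floordiv sqrt_dim 6)) (sqrt_dim + 1) 1) with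
    | some p => p
    | none =>
      match pvALoop2 dim (PySem.List.pyRange 2 (sqrt_dim + 1) 1) with
      | some p => p
      | none => (1, dim)

-- ===== PORT B =====
-- loop body of B's single fused pass: keep the first divisor hit in each accumulator
def pvStep (dim lo hi : Int) (acc : Option Int × Option Int) (s : Int) : Option Int × Option Int :=
  if PySem.Int.mod dim s = 0 then
    (match acc.1 with
     | none => if lo ≤ s ∧ s ≤ hi then some s else none
     | some v => some v,
     match acc.2 with
     | none => some s
     | some v => some v)
  else acc

def paper_factorization_py_alt (dim : Int) : Int × Int :=
  if dim ≤ 143 then (1, dim)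
  else
    let r := pvISqrt dim
    let lo := PySem.Int.floordiv r 6
    let hi := pvISqrt (PySem.Int.floordiv dim 3)
    match (PySem.List.pyRange 2 (r + 1) 1).foldl (pvStep dim lo hi) (none, none) with
    | (some s, _) => (s, PySem.Int.floordiv dim s)
    | (none, some s) => (s, PySem.Int.floordiv dim s)
    | (none, none) => (1, dim)

-- ===== PRECONDITION & SPEC =====
def Spec_paper_factorization_py (dim : Int) (out : Int × Int) : Prop := out = paper_factorization_py_alt dim
instance (dim : Int) (out : Int × Int) : Decidable (Spec_paper_factorization_py dim out) := by unfold Spec_paper_factorization_py; infer_instance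

-- ===== CLAIM (what is proved, stated in full; the proofs are below) =====
def Claim_equal_paper_factorization_py : Prop := ∀ (dim : Int), Dom_paper_factorization_py dim → Spec_paper_factorization_py dim (paper_factorization_py dim)

-- ===== LEMMAS AND PROOFS =====

-- A's first loop is a find? over the scanned list, paired with its quotient
theorem pvALoop1_eq_find? (dim : Int) (xs : List Int) :
    pvALoop1 dim xs =
      (xs.find? (fun s => decide (PySem.Int.mod dim s = 0) &&
        decide (PySem.Int.floordiv dim s ≥ s * 3))).map
        (fun s => (s, PySem.Int.floordiv dim s)) := by
  induction xs with
  | nil => simp [pvALoop1]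
  | cons s rest ih =>
    simp only [pvALoop1, List.find?]
    by_cases h1 : PySem.Int.mod dim s = 0 <;>
      by_cases h2 : PySem.Int.floordiv dim s ≥ s * 3 <;>
        simp [h1, h2, ih]

theorem pvALoop2_eq_find? (dim : Int) (xs : List Int) :
    pvALoop2 dim xs =
      (xs.find? (fun s => decide (PySem.Int.mod dim s = 0))).map
        (fun s => (s, PySem.Int.floordiv dim s)) := by
  induction xs with
  | nil => simp [pvALoop2]
  | cons s rest ih =>
    simp only [pvALoop2, List.find?]
    by_cases h1 : PySem.Int.mod dim s = 0 <;> simp [h1, ih]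

-- B's fused accumulator fold computes the two first hits, i.e. two find?s
theorem pvFold_eq_find? (dim lo hi : Int) (xs : List Int) (b1 b2 : Option Int) :
    xs.foldl (pvStep dim lo hi) (b1, b2) =
      (b1.or (xs.find? (fun s => decide (PySem.Int.mod dim s = 0) &&
          (decide (lo ≤ s) && decide (s ≤ hi)))),
       b2.or (xs.find? (fun s => decide (PySem.Int.mod dim s = 0)))) := by
  induction xs generalizing b1 b2 with
  | nil => simp
  | cons s rest ih =>
    simp only [List.foldl, List.find?, pvStep]
    by_cases h1 : PySem.Int.mod dim s = 0
    · cases b1 <;> cases b2 <;>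
        by_cases hA : lo ≤ s <;> by_cases hB : s ≤ hi <;>
          simp [h1, hA, hB, ih]
    · simp [h1, ih]

theorem find?_congr_mem (p q : Int → Bool) (l : List Int)
    (h : ∀ s ∈ l, p s = q s) : l.find? p = l.find? q := by
  induction l with
  | nil => simp
  | cons a t ih =>
    have ha := h a (by simp)
    simp only [List.find?, ha]
    by_cases hq : q a <;> simp [hq, ih fun s hs => h s (by simp [hs])]

theorem find?_eq_none_of (p : Int → Bool) (l : List Int)
    (h : ∀ s ∈ l, p s = false) : l.find? p = none := by
  rw [List.find?_eq_none]
  intro x hx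
  simp [h x hx]

-- the algebraic rewrite behind B: for a divisor s ≥ 1 of dim ≥ 1,
-- dim // s ≥ s * 3  ↔  s ≤ isqrt(dim // 3)
theorem pvRatio_iff (dim s : Int) (hdim : 1 ≤ dim) (hs : 1 ≤ s)
    (hdvd : PySem.Int.mod dim s = 0) :
    (PySem.Int.floordiv dim s ≥ s * 3) ↔ (s ≤ pvISqrt (PySem.Int.floordiv dim 3)) := by
  have hsd : s ∣ dim := (PySem.Int.mod_eq_zero_iff_dvd dim s).mp hdvd
  obtain ⟨q, hq⟩ := hsd
  have hfd : PySem.Int.floordiv dim s = q := by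
    rw [PySem.Int.floordiv_eq_ediv_of_pos (by omega), hq,
      Int.mul_ediv_cancel_left q (by omega : s ≠ 0)]
  have h3 : PySem.Int.floordiv dim 3 = dim / 3 :=
    PySem.Int.floordiv_eq_ediv_of_pos (by norm_num)
  have hq3 : dim = 3 * (dim / 3) + dim % 3 := by omega
  have hrem : 0 ≤ dim % 3 ∧ dim % 3 < 3 :=
    ⟨Int.emod_nonneg dim (by norm_num), Int.emod_lt_of_pos dim (by norm_num)⟩
  have hq3nn : 0 ≤ dim / 3 := Int.ediv_nonneg (by omega) (by norm_num)
  constructor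
  · intro hge
    -- q ≥ 3s, so s*s*3 ≤ s*q = dim, hence s*s ≤ dim/3, hence s ≤ sqrt
    rw [hfd] at hge
    have hsq : s * s * 3 ≤ dim := by
      calc s * s * 3 = s * (s * 3) := by ring
        _ ≤ s * q := by
            exact mul_le_mul_of_nonneg_left hge (by omega)
        _ = dim := hq.symm
    have hssle : s * s ≤ dim / 3 := by
      nlinarith [hrem.1, hrem.2, hq3]
    rw [h3]
    show s ≤ Int.ofNat (Nat.sqrt (dim / 3).toNat)
    have hnat : s.toNat * s.toNat ≤ (dim / 3).toNat := by
      have : (s * s : Int) = (s.toNat * s.toNat : Nat) := by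
        push_cast; rw [Int.toNat_of_nonneg (by omega)]
      omega
    have := Nat.le_sqrt.mpr hnat
    simp only [Int.ofNat_eq_natCast]
    omega
  · intro hle
    rw [h3] at hle
    have hle' : s.toNat ≤ Nat.sqrt (dim / 3).toNat := by
      simp only [pvISqrt, Int.ofNat_eq_natCast] at hle; omega
    have hnat : s.toNat * s.toNat ≤ (dim / 3).toNat := Nat.le_sqrt.mp hle'
    have hss : (s * s : Int) ≤ dim / 3 := by
      have : (s * s : Int) = (s.toNat * s.toNat : Nat) := by
        push_cast; rw [Int.toNat_of_nonneg (by omega)]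
      omega
    have hsq : s * s * 3 ≤ dim := by nlinarith [hrem.1, hq3]
    rw [hfd]
    have : s * (s * 3) ≤ s * q := by nlinarith
    exact le_of_mul_le_mul_left this (by omega)

-- ===== VERDICT (by name: the statement is the Claim_ definition above) =====
theorem paper_factorization_py_spec : Claim_equal_paper_factorization_py := by
  unfold Claim_equal_paper_factorization_py
  intro dim _
  unfold Spec_paper_factorization_py paper_factorization_py paper_factorization_py_alt
  by_cases h36 : dim ≤ 36
  · simp [h36, show dim ≤ 143 by omega]
  · by_cases h143 : dim ≤ 143
    · -- 36 < dim ≤ 143: A's first scan starts at 1, which qualifies at once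
      simp only [h36, if_false, h143, if_true]
      have hr6 : 6 ≤ Nat.sqrt dim.toNat := Nat.le_sqrt.mpr (by omega)
      have hr11 : Nat.sqrt dim.toNat < 12 := Nat.sqrt_lt.mpr (by omega)
      set sq : Int := pvISqrt dim with hsq
      have hsqb : 6 ≤ sq ∧ sq < 12 := by
        simp only [hsq, pvISqrt, Int.ofNat_eq_natCast]; omega
      have hlo : PySem.Int.floordiv sq 6 = 1 := by
        rw [PySem.Int.floordiv_eq_ediv_of_pos (by norm_num)]; omega
      rw [hlo]
      have hmax : max (1:Int) 1 = 1 := by norm_num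
      rw [hmax, PySem.List.pyRange_one_cons (by omega : (1:Int) < sq + 1)]
      have hmod1 : PySem.Int.mod dim 1 = 0 :=
        (PySem.Int.mod_eq_zero_iff_dvd dim 1).mpr (one_dvd dim)
      have hfd1 : PySem.Int.floordiv dim 1 = dim := by
        rw [PySem.Int.floordiv_eq_ediv_of_pos (by norm_num)]; omega
      simp only [pvALoop1, hmod1, hfd1]
      rw [if_pos (show dim ≥ 1 * 3 by omega)]
      simp
    · -- dim ≥ 144: fused fold equals the two staged scans
      simp only [h36, if_false, h143, if_false]
      set sq : Int := pvISqrt dim with hsq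
      have hr12 : 12 ≤ Nat.sqrt dim.toNat := Nat.le_sqrt.mpr (by omega)
      have hsq12 : 12 ≤ sq := by
        simp only [hsq, pvISqrt, Int.ofNat_eq_natCast]; omega
      set lo : Int := PySem.Int.floordiv sq 6 with hlo
      set hi : Int := pvISqrt (PySem.Int.floordiv dim 3) with hhi
      have hloe : lo = sq / 6 := by
        rw [hlo, PySem.Int.floordiv_eq_ediv_of_pos (by norm_num)]
      have hlo2 : 2 ≤ lo := by rw [hloe]; omega
      have hlosq : lo ≤ sq + 1 := by rw [hloe]; omega
      have hmax : max (1:Int) lo = lo := by omega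
      rw [hmax]
      -- both passes of A as find?s over [lo, sq+1) and [2, sq+1)
      rw [pvALoop1_eq_find?, pvALoop2_eq_find?,
        pvFold_eq_find? dim lo hi (PySem.List.pyRange 2 (sq + 1) 1) none none]
      simp only [Option.or]
      -- the fused pass's preferred find? equals A's first-pass find?
      have hfind1 :
          (PySem.List.pyRange 2 (sq + 1) 1).find? (fun s =>
              decide (PySem.Int.mod dim s = 0) && (decide (lo ≤ s) && decide (s ≤ hi))) =
            (PySem.List.pyRange lo (sq + 1) 1).find? (fun s =>
              decide (PySem.Int.mod dim s = 0) && decide (PySem.Int.floordiv dim s ≥ s * 3)) := by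
        rw [PySem.List.pyRange_one_append 2 lo (sq + 1) hlo2 hlosq, List.find?_append]
        have hnone :
            (PySem.List.pyRange 2 lo 1).find? (fun s =>
              decide (PySem.Int.mod dim s = 0) && (decide (lo ≤ s) && decide (s ≤ hi))) = none := by
          apply find?_eq_none_of
          intro s hs
          rw [PySem.List.mem_pyRange_one] at hs
          simp [show ¬ (lo ≤ s) by omega]
        rw [hnone, Option.none_or]
        apply find?_congr_mem
        intro s hs
        rw [PySem.List.mem_pyRange_one] at hs
        by_cases hm : PySem.Int.mod dim s = 0
        · have hiff := pvRatio_iff dim s (by omega) (by omega) hm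
          rw [← hhi] at hiff
          by_cases hr : PySem.Int.floordiv dim s ≥ s * 3
          · simp [hm, hr, hs.1, hiff.mp hr]
          · have hhi' : hi < s := by
              by_contra hle
              exact hr (hiff.mpr (by omega))
            simp [hm, hr]
            omega
        · simp [hm]
      rw [hfind1]
      cases (PySem.List.pyRange lo (sq + 1) 1).find? (fun s =>
          decide (PySem.Int.mod dim s = 0) && decide (PySem.Int.floordiv dim s ≥ s * 3)) with
      | some s => simp
      | none =>
        simp only [Option.map_none]
        cases (PySem.List.pyRange 2 (sq + 1) 1).find?
            (fun s => decide (PySem.Int.mod dim s = 0)) with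
        | some s => simp
        | none => simp
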